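-- pv_equiv track=rewrite | github.com/Nav1919/AI | Unit 2/1 Panicker Pranav nqueens_backtracking.py | edgeOrder
-- ===== SOURCE A (Python) =====
-- def edgeOrder(vals):
--     added=set()
--     retOrder=list()
--     for i in range(len(vals)):
--         if(i==len(vals)//2 and len(vals)%2==1):
--             retOrder.append(i)
--             break
--         elif len(vals)-i-1 not in added:
--             retOrder.append(i)
--             retOrder.append(len(vals)-i-1)
--             added.add(i)
--         else:
--             break
--     return retOrder
-- ===== SOURCE B (Python) =====
-- def edgeOrder(vals):
--     order = []
--     lo, hi = 0, len(vals) - 1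
--     while lo < hi:
--         order.append(lo)
--         order.append(hi)
--         lo += 1
--         hi -= 1
--     if lo == hi:
--         order.append(lo)
--     return order
-- ===== Notes on version B (the rewrite author's own statement) =====
-- stated objective: simpler
-- what changed: Replaces the visited-set with membership-test-and-break loop by two converging index pointers that terminate on pointer crossing, dropping the set entirely.
import Mathlib
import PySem

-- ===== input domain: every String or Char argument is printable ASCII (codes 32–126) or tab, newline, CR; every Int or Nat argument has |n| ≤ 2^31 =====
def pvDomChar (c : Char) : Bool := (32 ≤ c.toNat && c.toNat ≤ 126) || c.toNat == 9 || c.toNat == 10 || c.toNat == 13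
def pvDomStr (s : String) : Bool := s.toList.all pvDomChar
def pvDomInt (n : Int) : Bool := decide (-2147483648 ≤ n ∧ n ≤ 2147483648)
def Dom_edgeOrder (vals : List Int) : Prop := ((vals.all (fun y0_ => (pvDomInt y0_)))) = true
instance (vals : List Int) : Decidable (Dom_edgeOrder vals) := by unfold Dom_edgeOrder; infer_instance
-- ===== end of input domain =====

-- B replaces A's visited-set bookkeeping and break with two converging pointers; same values, simpler loop.

-- ===== PORT A =====
-- the for-loop over range(len(vals)) with early break, carrying 'added' and 'retOrder'
def edgeOrderGo (n : Int) (idxs : List Int) (added : PySem.Set Int) (ret : List Int) : List Int :=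
  match idxs with
  | [] => ret
  | i :: rest =>
    if i = PySem.Int.floordiv n 2 ∧ PySem.Int.mod n 2 = 1 then ret ++ [i]
    else if ¬ (PySem.Set.contains added (n - i - 1) = true) then
      edgeOrderGo n rest (PySem.Set.add added i) (ret ++ [i, n - i - 1])
    else ret

def edgeOrder (vals : List Int) : List Int :=
  edgeOrderGo (vals.length : Int) (PySem.List.pyRange 0 (vals.length : Int) 1) PySem.Set.empty []

-- ===== PORT B =====
-- while lo < hi: append lo, hi; lo += 1; hi -= 1;  then if lo == hi append lo
def edgeOrderAltGo (lo hi : Int) (order : List Int) : List Int :=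
  if lo < hi then edgeOrderAltGo (lo + 1) (hi - 1) (order ++ [lo, hi])
  else if lo = hi then order ++ [lo] else order
termination_by (hi - lo + 1).toNat
decreasing_by omega

def edgeOrder_alt (vals : List Int) : List Int :=
  edgeOrderAltGo 0 ((vals.length : Int) - 1) []

-- ===== PRECONDITION & SPEC =====
def Spec_edgeOrder (vals : List Int) (out : List Int) : Prop := out = edgeOrder_alt vals
instance (vals : List Int) (out : List Int) : Decidable (Spec_edgeOrder vals out) := by unfold Spec_edgeOrder; infer_instance

-- ===== CLAIM (what is proved, stated in full; the proofs are below) =====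
def Claim_equal_edgeOrder : Prop := ∀ (vals : List Int), Dom_edgeOrder vals → Spec_edgeOrder vals (edgeOrder vals)

-- ===== LEMMAS AND PROOFS =====

-- A's loop from index j (added = {0,…,j-1}) equals B's loop from pointers (j, n-1-j).
theorem edgeOrderGo_eq (n : Int) (hn : 0 ≤ n) (j : Int) (hj : 0 ≤ j)
    (added : PySem.Set Int) (ret : List Int)
    (hmem : ∀ x : Int, x ∈ added ↔ 0 ≤ x ∧ x < j) :
    edgeOrderGo n (PySem.List.pyRange j n 1) added ret = edgeOrderAltGo j (n - 1 - j) ret := by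
  by_cases hjn : j < n
  · rw [PySem.List.pyRange_one_cons hjn]
    unfold edgeOrderGo
    by_cases hmid : j = PySem.Int.floordiv n 2 ∧ PySem.Int.mod n 2 = 1
    · rw [if_pos hmid]
      have h2 : 2 * j = n - 1 := by
        obtain ⟨h1, h2⟩ := hmid
        have := PySem.Int.floordiv_mul_add_mod n 2
        omega
      rw [edgeOrderAltGo, if_neg (by omega : ¬ j < n - 1 - j), if_pos (by omega : j = n - 1 - j)]
    · rw [if_neg hmid]
      have hnotodd : ¬ (2 * j = n - 1) := by
        intro h
        have hfd : PySem.Int.floordiv n 2 = j := by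
          rw [PySem.Int.floordiv_eq_iff_of_pos (by omega)]; omega
        have hm : PySem.Int.mod n 2 = 1 := by
          have := PySem.Int.floordiv_mul_add_mod n 2
          omega
        exact hmid ⟨hfd.symm, hm⟩
      have hcont : PySem.Set.contains added (n - j - 1) = true ↔ n - j - 1 < j := by
        rw [PySem.Set.contains_iff, hmem]; omega
      by_cases hlt : n - j - 1 < j
      · -- A breaks; B: lo > hi
        rw [if_neg (not_not_intro (hcont.mpr hlt))]
        rw [edgeOrderAltGo, if_neg (by omega : ¬ j < n - 1 - j), if_neg (by omega : ¬ j = n - 1 - j)]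
      · have hcf : ¬ PySem.Set.contains added (n - j - 1) = true := fun h => hlt (hcont.mp h)
        rw [if_pos hcf]
        have hstrict : j < n - 1 - j := by omega
        rw [edgeOrderGo_eq n hn (j + 1) (by omega) (PySem.Set.add added j) (ret ++ [j, n - j - 1])
            (by intro x; rw [PySem.Set.mem_add, hmem]; omega)]
        conv_rhs => rw [edgeOrderAltGo]
        rw [if_pos hstrict]
        have e1 : n - 1 - j - 1 = n - 1 - (j + 1) := by ring
        have e2 : n - j - 1 = n - 1 - j := by ring
        rw [e1, e2]
  · rw [PySem.List.pyRange_one_eq_nil (by omega)]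
    unfold edgeOrderGo
    rw [edgeOrderAltGo, if_neg (by omega : ¬ j < n - 1 - j), if_neg (by omega : ¬ j = n - 1 - j)]
termination_by (n - j).toNat
decreasing_by omega

-- ===== VERDICT (by name: the statement is the Claim_ definition above) =====
theorem edgeOrder_spec : Claim_equal_edgeOrder := by
  intro vals _
  unfold Spec_edgeOrder edgeOrder edgeOrder_alt
  rw [edgeOrderGo_eq (vals.length : Int) (by positivity) 0 le_rfl PySem.Set.empty []
      (by intro x; simp [PySem.Set.empty])]
  norm_num
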